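-- pv_equiv track=rewrite | github.com/rkecherry/IS2 | prac4.py | FillerLetter
-- ===== SOURCE A (Python) =====
-- def FillerLetter(text):
-- 	k = len(text)
-- 	if k % 2 == 0:
-- 		for i in range(0, k, 2):
-- 			if text[i] == text[i+1]:
-- 				new_word = text[0:i+1] + str('x') + text[i+1:]
-- 				new_word = FillerLetter(new_word)
-- 				break
-- 			else:
-- 				new_word = text
-- 	else:
-- 		for i in range(0, k-1, 2):
-- 			if text[i] == text[i+1]:
-- 				new_word = text[0:i+1] + str('x') + text[i+1:]
-- 				new_word = FillerLetter(new_word)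
-- 				break
-- 			else:
-- 				new_word = text
-- 	return new_word
-- ===== SOURCE B (Python) =====
-- def FillerLetter(text):
--     out = []
--     i = 0
--     n = len(text)
--     while i < n - 1:
--         a = text[i]
--         if a == text[i + 1]:
--             out.append(a)
--             out.append('x')
--             i += 1
--         else:
--             out.append(a)
--             out.append(text[i + 1])
--             i += 2
--     if i < n:
--         out.append(text[i])
--     return ''.join(out)
-- ===== Notes on version B (the rewrite author's own statement) =====
-- stated objective: faster
-- what changed: B makes a single left-to-right pass emitting the text pair by pair (inserting 'x' after an equal pair and advancing by one), instead of A's restart-from-the-top recursion that rescans and re-slices the whole string after every insertion.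
-- outside the precondition, e.g. on FillerLetter('axx'): A returns 'axx', B returns 'axx'; on FillerLetter('x'): A raises UnboundLocalError, B returns 'x'; on FillerLetter('xx'): A raises RecursionError, B returns 'xxx'
-- crash fix: A raises UnboundLocalError on strings shorter than 2 (B returns the text unchanged) and recurses forever (RecursionError) on strings where the scan meets an even-aligned 'xx' pair, e.g. 'xx', where B simply inserts 'x' and returns ('xxx' for 'xx'). — e.g. on FillerLetter("xx"): A raises RecursionError, B returns "xxx"
import Mathlib
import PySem

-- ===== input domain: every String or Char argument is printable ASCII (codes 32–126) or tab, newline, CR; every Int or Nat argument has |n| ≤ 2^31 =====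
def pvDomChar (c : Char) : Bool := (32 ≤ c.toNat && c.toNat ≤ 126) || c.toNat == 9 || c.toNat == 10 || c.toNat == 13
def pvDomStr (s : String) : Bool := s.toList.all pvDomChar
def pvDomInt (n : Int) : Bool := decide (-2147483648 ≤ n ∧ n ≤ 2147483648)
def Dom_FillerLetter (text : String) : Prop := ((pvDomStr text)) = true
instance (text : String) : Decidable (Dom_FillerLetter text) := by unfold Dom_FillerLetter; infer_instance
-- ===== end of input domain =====

-- B replaces A's restart-from-the-top recursion (which rescans and re-slices the whole string
-- after every insertion) by a single left-to-right pass over the text.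

-- ===== PORT A =====
-- text[0:i+1] + 'x' + text[i+1:]  (i+1 ≥ 0, so plain take/drop are exact here)
def pvInsertA (cs : List Char) (i : Nat) : List Char :=
  cs.take (i + 1) ++ 'x' :: cs.drop (i + 1)

-- the upper bound of A's range: range(0,k,2) for even k, range(0,k-1,2) for odd k
def pvBoundA (cs : List Char) : Nat :=
  if cs.length % 2 = 0 then cs.length else cs.length - 1

-- A's for-loop plus its recursive call, fuelled: the Python recursion can be infinite
-- (even-aligned 'xx'); those inputs are outside Pre_, and within Pre_ the fuel text.length is
-- proved sufficient.  Indices i, i+1 are in range whenever i < pvBoundA cs, so getD is exact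
-- there.  When the loop body never ran (len < 2) Python raises UnboundLocalError; that input
-- is outside Pre_ (the port returns cs there).
def pvLoopA (fuel : Nat) (cs : List Char) (i : Nat) : List Char :=
  if h : i < pvBoundA cs then
    if cs.getD i ' ' = cs.getD (i + 1) ' ' then
      match fuel with
      | 0 => pvInsertA cs i          -- fuel exhausted: unreachable under Pre_
      | f + 1 => pvLoopA f (pvInsertA cs i) 0
    else pvLoopA fuel cs (i + 2)
  else cs
termination_by (fuel, pvBoundA cs - i)
decreasing_by
  · exact Prod.Lex.left _ _ (Nat.lt_succ_self _)
  · exact Prod.Lex.right _ (by omega)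

def FillerLetter (text : String) : String :=
  String.mk (pvLoopA text.toList.length text.toList 0)

-- ===== PORT B =====
-- Source B's while-loop: i walks the string, out is the output accumulator.
def pvLoopB (cs : List Char) (i : Nat) (out : List Char) : List Char :=
  if i + 1 < cs.length then
    if cs.getD i ' ' = cs.getD (i + 1) ' ' then
      pvLoopB cs (i + 1) (out ++ [cs.getD i ' ', 'x'])
    else
      pvLoopB cs (i + 2) (out ++ [cs.getD i ' ', cs.getD (i + 1) ' '])
  else if i < cs.length then out ++ [cs.getD i ' '] else out
termination_by cs.length - i
decreasing_by all_goals omega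

def FillerLetter_alt (text : String) : String :=
  String.mk (pvLoopB text.toList 0 [])

-- ===== PRECONDITION & SPEC =====
-- Pre_ excludes (a) strings shorter than 2, on which A raises UnboundLocalError, and
-- (b) strings containing the substring 'xx': on those where an 'xx' is met even-aligned
-- A recurses forever (RecursionError); the simple substring condition is the readable closed
-- form covering them (on the remaining 'xx'-strings A returns and agrees with B anyway).
def Pre_FillerLetter (text : String) : Prop :=
  2 ≤ text.toList.length ∧
  ∀ j < text.toList.length - 1,
    ¬(text.toList.getD j ' ' = 'x' ∧ text.toList.getD (j + 1) ' ' = 'x')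
instance (text : String) : Decidable (Pre_FillerLetter text) := by
  unfold Pre_FillerLetter; infer_instance

def pvWitness_FillerLetter : String := "hello"

-- A raises (UnboundLocalError for len < 2, otherwise RecursionError: the scan meets an
-- even-aligned 'xx' — an 'xx' at j whose distance back to the last equal-pair reset is even);
-- B returns a value on all of these (for 'xx' it returns 'xxx').
def Raises_FillerLetter (text : String) : Prop :=
  text.toList.length < 2 ∨
  ∃ j < text.toList.length - 1,
    text.toList.getD j ' ' = 'x' ∧ text.toList.getD (j + 1) ' ' = 'x' ∧
    ∃ m < j + 1,
      (m = 0 ∨ text.toList.getD (m - 1) ' ' = text.toList.getD m ' ') ∧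
      Even (j - m) ∧
      ∀ i < j + 1, m < i → ¬(i = 0 ∨ text.toList.getD (i - 1) ' ' = text.toList.getD i ' ')
instance (text : String) : Decidable (Raises_FillerLetter text) := by
  unfold Raises_FillerLetter; infer_instance

def pvRaiseWitness_FillerLetter : String := "xx"
def pvRaiseWitnessOut_FillerLetter : String := "xxx"

def Spec_FillerLetter (text : String) (out : String) : Prop := out = FillerLetter_alt text
instance (text : String) (out : String) : Decidable (Spec_FillerLetter text out) := by
  unfold Spec_FillerLetter; infer_instance

-- ===== CLAIM (what is proved, stated in full; the proofs are below) =====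
def Claim_equal_FillerLetter : Prop :=
  ∀ (text : String), Dom_FillerLetter text → Pre_FillerLetter text →
    Spec_FillerLetter text (FillerLetter text)

def Claim_raises_FillerLetter : Prop :=
  (∀ (text : String), Dom_FillerLetter text → Raises_FillerLetter text → ¬ Pre_FillerLetter text) ∧
  (Dom_FillerLetter (pvRaiseWitness_FillerLetter) ∧ Raises_FillerLetter (pvRaiseWitness_FillerLetter) ∧
    FillerLetter_alt (pvRaiseWitness_FillerLetter) = pvRaiseWitnessOut_FillerLetter)

-- ===== LEMMAS AND PROOFS =====

-- structural one-pass recursion: the common denominator of the two ports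
def gB : List Char → List Char
  | [] => []
  | [c] => [c]
  | c :: d :: r => if c = d then c :: 'x' :: gB (d :: r) else c :: d :: gB r

-- structural "no adjacent 'x','x'" predicate (bridged to Pre_'s indexed form below)
def noxx : List Char → Prop
  | [] => True
  | [_] => True
  | c :: d :: r => ¬(c = 'x' ∧ d = 'x') ∧ noxx (d :: r)

-- number of adjacent equal pairs: the fuel measure of A's recursion
def countAdj : List Char → Nat
  | [] => 0
  | [_] => 0
  | c :: d :: r => (if c = d then 1 else 0) + countAdj (d :: r)

theorem gB_short (l : List Char) (h : l.length ≤ 1) : gB l = l := by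
  match l with
  | [] => rfl
  | [c] => rfl
  | c :: d :: r => simp at h

theorem noxx_tail (a : Char) (t : List Char) (h : noxx (a :: t)) : noxx t := by
  match t with
  | [] => trivial
  | b :: r => exact h.2

theorem noxx_drop (i : Nat) (cs : List Char) (h : noxx cs) : noxx (cs.drop i) := by
  induction i generalizing cs with
  | zero => simpa using h
  | succ k ih =>
    match cs with
    | [] => trivial
    | a :: t => exact ih t (noxx_tail a t h)

theorem countAdj_le (cs : List Char) : countAdj cs ≤ cs.length := by
  induction cs with
  | nil => simp [countAdj]
  | cons c t ih =>
    cases t with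
    | nil => simp [countAdj]
    | cons d r =>
      simp only [countAdj, List.length_cons] at *
      split <;> omega

theorem countAdj_pos (i : Nat) (cs : List Char) (h : i + 1 < cs.length)
    (he : cs.getD i ' ' = cs.getD (i + 1) ' ') : 1 ≤ countAdj cs := by
  induction i generalizing cs with
  | zero =>
    match cs with
    | c :: d :: r =>
      simp only [List.getD_cons_zero, List.getD_cons_succ] at he
      simp [countAdj, he]
  | succ k ih =>
    match cs with
    | c :: d :: r =>
      have : 1 ≤ countAdj (d :: r) := by
        apply ih (d :: r) (by simpa using h)
        simpa using he
      simp only [countAdj]; omega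

theorem insertA_zero (c : Char) (t : List Char) :
    pvInsertA (c :: t) 0 = c :: 'x' :: t := by
  simp [pvInsertA]

theorem insertA_succ (c : Char) (t : List Char) (k : Nat) :
    pvInsertA (c :: t) (k + 1) = c :: pvInsertA t k := by
  simp [pvInsertA, List.take_succ_cons, List.drop_succ_cons]

theorem insertA_cons (b : Char) (t : List Char) (k : Nat) :
    pvInsertA (b :: t) k = b :: (if k = 0 then 'x' :: t else pvInsertA t (k - 1)) := by
  cases k with
  | zero => simp [insertA_zero]
  | succ m => simp [insertA_succ]

theorem noxx_insert (i : Nat) (cs : List Char) (hx : noxx cs) (h : i + 1 < cs.length)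
    (he : cs.getD i ' ' = cs.getD (i + 1) ' ') : noxx (pvInsertA cs i) := by
  induction i generalizing cs with
  | zero =>
    match cs with
    | c :: d :: r =>
      simp only [List.getD_cons_zero, List.getD_cons_succ] at he
      subst he
      have hcx : ¬(c = 'x') := fun hc => hx.1 ⟨hc, hc⟩
      rw [insertA_zero]
      exact ⟨fun hh => hcx hh.1, fun hh => hcx hh.2, hx.2⟩
  | succ k ih =>
    match cs with
    | c :: d :: r =>
      have h' : k + 1 < (d :: r).length := by simpa using h
      have he' : (d :: r).getD k ' ' = (d :: r).getD (k + 1) ' ' := by simpa using he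
      have hni := ih (d :: r) hx.2 h' he'
      have hshape := insertA_cons d r k
      rw [insertA_succ, hshape]
      exact ⟨hx.1, hshape ▸ hni⟩

theorem countAdj_insert (i : Nat) (cs : List Char) (hx : noxx cs) (h : i + 1 < cs.length)
    (he : cs.getD i ' ' = cs.getD (i + 1) ' ') :
    countAdj (pvInsertA cs i) + 1 = countAdj cs := by
  induction i generalizing cs with
  | zero =>
    match cs with
    | c :: d :: r =>
      simp only [List.getD_cons_zero, List.getD_cons_succ] at he
      subst he
      have hcx : ¬(c = 'x') := fun hc => hx.1 ⟨hc, hc⟩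
      have hxc : ¬('x' = c) := fun hh => hcx hh.symm
      rw [insertA_zero]
      have e1 : countAdj (c :: 'x' :: c :: r) = countAdj (c :: r) := by
        simp [countAdj, hcx, hxc]
      have e2 : countAdj (c :: c :: r) = 1 + countAdj (c :: r) := by
        simp [countAdj]
      omega
  | succ k ih =>
    match cs with
    | c :: d :: r =>
      have h' : k + 1 < (d :: r).length := by simpa using h
      have he' : (d :: r).getD k ' ' = (d :: r).getD (k + 1) ' ' := by simpa using he
      have hci := ih (d :: r) hx.2 h' he'
      have hshape := insertA_cons d r k
      rw [insertA_succ, hshape]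
      rw [hshape] at hci
      simp only [countAdj] at hci ⊢
      split <;> omega

-- gB splits off a prefix whose even-aligned pairs are all unequal
theorem gB_prefix : ∀ (i : Nat) (cs : List Char), Even i → i ≤ cs.length →
    (∀ j, j + 1 < i → Even j → cs.getD j ' ' ≠ cs.getD (j + 1) ' ') →
    gB cs = cs.take i ++ gB (cs.drop i) := by
  intro i
  induction i using Nat.strong_induction_on with
  | _ i ih =>
    intro cs hev hle hprior
    match i, hev with
    | 0, _ => simp
    | 1, hev => exact absurd hev (by decide)
    | (k + 2), hev =>
      match cs with
      | [] => simp at hle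
      | [c] => simp at hle
      | c :: d :: r =>
        have hne : c ≠ d := by
          have := hprior 0 (by omega) (by decide)
          simpa using this
        have hek : Even k := by
          rcases hev with ⟨m, hm⟩
          exact ⟨m - 1, by omega⟩
        have hrk : k ≤ r.length := by simpa using hle
        have hpr : ∀ j, j + 1 < k → Even j → r.getD j ' ' ≠ r.getD (j + 1) ' ' := by
          intro j hj hje
          have := hprior (j + 2) (by omega) (by rcases hje with ⟨m, hm⟩; exact ⟨m + 1, by omega⟩)
          simpa using this
        have := ih k (by omega) r hek hrk hpr
        simp only [gB, if_neg hne, List.take_succ_cons, List.drop_succ_cons]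
        rw [this]
        simp

theorem loopB_eq : ∀ (m i : Nat) (cs : List Char) (out : List Char), cs.length - i ≤ m →
    pvLoopB cs i out = out ++ gB (cs.drop i) := by
  intro m
  induction m with
  | zero =>
    intro i cs out hm
    rw [pvLoopB]
    have h1 : ¬(i + 1 < cs.length) := by omega
    have h2 : ¬(i < cs.length) := by omega
    rw [if_neg h1, if_neg h2, List.drop_eq_nil_of_le (by omega), gB]
    simp
  | succ m ih =>
    intro i cs out hm
    rw [pvLoopB]
    by_cases h1 : i + 1 < cs.length
    · rw [if_pos h1]
      have hi : i < cs.length := by omega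
      have hd : cs.drop i = cs[i] :: cs.drop (i + 1) := List.drop_eq_getElem_cons hi
      have hd2 : cs.drop (i + 1) = cs[i + 1] :: cs.drop (i + 2) := List.drop_eq_getElem_cons h1
      have hgi : cs.getD i ' ' = cs[i] := List.getD_eq_getElem cs ' ' hi
      have hgi2 : cs.getD (i + 1) ' ' = cs[i + 1] := List.getD_eq_getElem cs ' ' h1
      by_cases he : cs.getD i ' ' = cs.getD (i + 1) ' '
      · rw [if_pos he, ih (i + 1) cs _ (by omega)]
        rw [hd, hd2, gB]
        have : cs[i] = cs[i + 1] := by rw [← hgi, ← hgi2, he]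
        rw [if_pos this, hgi, ← hd2]
        simp
      · rw [if_neg he, ih (i + 2) cs _ (by omega)]
        rw [hd, hd2, gB]
        have : ¬(cs[i] = cs[i + 1]) := by rw [← hgi, ← hgi2]; exact he
        rw [if_neg this, hgi, hgi2]
        simp
    · rw [if_neg h1]
      by_cases h2 : i < cs.length
      · have hd : cs.drop i = cs[i] :: cs.drop (i + 1) := List.drop_eq_getElem_cons h2
        rw [if_pos h2, hd, List.drop_eq_nil_of_le (by omega), gB,
          List.getD_eq_getElem cs ' ' h2]
      · rw [if_neg h2, List.drop_eq_nil_of_le (by omega), gB]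
        simp

-- take (i+2) as take i plus the two scanned characters
theorem take_two (cs : List Char) (i : Nat) (h : i + 1 < cs.length) :
    cs.take (i + 2) = cs.take i ++ [cs[i], cs[i + 1]] := by
  rw [show i + 2 = i + 1 + 1 from rfl, List.take_add_one, List.take_add_one,
    List.getElem?_eq_getElem (by omega : i < cs.length), List.getElem?_eq_getElem h,
    List.append_assoc]
  rfl

-- the indexed no-'xx' condition of Pre_ implies the structural one
theorem noxx_of_indexed : ∀ (cs : List Char),
    (∀ j < cs.length - 1, ¬(cs.getD j ' ' = 'x' ∧ cs.getD (j + 1) ' ' = 'x')) → noxx cs := by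
  intro cs h
  match cs with
  | [] => trivial
  | [c] => trivial
  | c :: d :: r =>
    refine ⟨by simpa using h 0 (by simp), ?_⟩
    apply noxx_of_indexed (d :: r)
    intro j hj
    have := h (j + 1) (by simp at hj ⊢; omega)
    simpa using this

-- main invariant: A's fuelled scan from an even position whose earlier even pairs are unequal
theorem loopA_eq : ∀ (fuel : Nat) (cs : List Char), noxx cs → countAdj cs ≤ fuel →
    ∀ (m i : Nat), cs.length - i ≤ m → Even i → i ≤ cs.length →
    (∀ j, j + 1 < i → Even j → cs.getD j ' ' ≠ cs.getD (j + 1) ' ') →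
    pvLoopA fuel cs i = cs.take i ++ gB (cs.drop i) := by
  intro fuel
  induction fuel using Nat.strong_induction_on with
  | _ fuel ihf =>
    intro cs hnx hcnt m
    induction m with
    | zero =>
      intro i hm hev hile hprior
      rw [pvLoopA.eq_def]
      have hnb : ¬(i < pvBoundA cs) := by unfold pvBoundA; split <;> omega
      rw [dif_neg hnb]
      have hi : i = cs.length := by omega
      rw [hi, List.drop_eq_nil_of_le (le_refl cs.length), gB]
      simp
    | succ m ihm =>
      intro i hm hev hile hprior
      rw [pvLoopA.eq_def]
      by_cases hb : i < pvBoundA cs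
      · rw [dif_pos hb]
        have h1 : i + 1 < cs.length := by
          rcases hev with ⟨t, ht⟩
          unfold pvBoundA at hb
          rcases Nat.even_or_odd cs.length with hp | hp
          · rw [if_pos (Nat.even_iff.mp hp)] at hb
            have := Nat.even_iff.mp hp
            omega
          · rw [if_neg (by have := Nat.odd_iff.mp hp; omega)] at hb
            omega
        have hd : cs.drop i = cs[i] :: cs.drop (i + 1) := List.drop_eq_getElem_cons (by omega)
        have hd2 : cs.drop (i + 1) = cs[i + 1] :: cs.drop (i + 2) := List.drop_eq_getElem_cons h1
        have hgi : cs.getD i ' ' = cs[i] := List.getD_eq_getElem cs ' ' (by omega)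
        have hgi2 : cs.getD (i + 1) ' ' = cs[i + 1] := List.getD_eq_getElem cs ' ' h1
        by_cases he : cs.getD i ' ' = cs.getD (i + 1) ' '
        · rw [if_pos he]
          have heq : cs[i] = cs[i + 1] := by rw [← hgi, ← hgi2, he]
          have hcnt1 : 1 ≤ countAdj cs := countAdj_pos i cs h1 he
          cases fuel with
          | zero => exact absurd hcnt1 (by omega)
          | succ f =>
            have hnx' : noxx (pvInsertA cs i) := noxx_insert i cs hnx h1 he
            have hcnt' : countAdj (pvInsertA cs i) ≤ f := by
              have := countAdj_insert i cs hnx h1 he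
              omega
            have hrec := ihf f (by omega) (pvInsertA cs i) hnx' hcnt'
              ((pvInsertA cs i).length) 0 (by omega) (by decide) (by omega) (by omega)
            show pvLoopA f (pvInsertA cs i) 0 = List.take i cs ++ gB (List.drop i cs)
            rw [hrec]
            simp only [List.take_zero, List.drop_zero, List.nil_append]
            -- now show gB (insert cs i) = take i cs ++ gB (drop i cs)
            have hlt : (cs.take (i + 1)).length = i + 1 := by
              rw [List.length_take]; omega
            have htk : (pvInsertA cs i).take i = cs.take i := by
              unfold pvInsertA
              rw [List.take_append_of_le_length (by omega), List.take_take]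
              congr 1
              omega
            have hdr : (pvInsertA cs i).drop i = cs[i] :: 'x' :: cs[i + 1] :: cs.drop (i + 2) := by
              unfold pvInsertA
              rw [List.drop_append_of_le_length (by omega), List.drop_take, hd,
                show i + 1 - i = 1 from by omega, List.take_cons, List.take_zero, hd2]
              · rfl
              · omega
            have hprior' : ∀ j, j + 1 < i → Even j →
                (pvInsertA cs i).getD j ' ' ≠ (pvInsertA cs i).getD (j + 1) ' ' := by
              intro j hj hje
              have e1 : (pvInsertA cs i).getD j ' ' = cs.getD j ' ' := by
                unfold pvInsertA
                rw [List.getD_append _ _ _ _ (by omega)]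
                rw [List.getD_eq_getElem _ ' ' (by omega), List.getD_eq_getElem cs ' ' (by omega),
                  List.getElem_take]
              have e2 : (pvInsertA cs i).getD (j + 1) ' ' = cs.getD (j + 1) ' ' := by
                unfold pvInsertA
                rw [List.getD_append _ _ _ _ (by omega)]
                rw [List.getD_eq_getElem _ ' ' (by omega), List.getD_eq_getElem cs ' ' (by omega),
                  List.getElem_take]
              rw [e1, e2]
              exact hprior j hj hje
            have hPL := gB_prefix i (pvInsertA cs i) hev
              (by unfold pvInsertA; rw [List.length_append, hlt]; omega) hprior'
            rw [hPL, htk, hdr]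
            -- both sides: take i cs ++ c :: 'x' :: gB (c :: drop (i+2) cs)
            have hnxd : noxx (cs.drop i) := noxx_drop i cs hnx
            rw [hd, hd2] at hnxd
            have hcx : cs[i] ≠ 'x' := fun hc => hnxd.1 ⟨hc, heq ▸ hc⟩
            have g1 : gB (cs[i] :: 'x' :: cs[i + 1] :: cs.drop (i + 2)) =
                cs[i] :: 'x' :: gB (cs[i + 1] :: cs.drop (i + 2)) := by
              rw [gB, if_neg hcx]
            have g2 : gB (cs.drop i) = cs[i] :: 'x' :: gB (cs[i + 1] :: cs.drop (i + 2)) := by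
              rw [hd, hd2, gB, if_pos heq]
            rw [g1, g2]
        · rw [if_neg he]
          have hrec := ihm (i + 2) (by omega)
            (by rcases hev with ⟨t, ht⟩; exact ⟨t + 1, by omega⟩)
            (by omega)
            (by
              intro j hj hje
              by_cases hlt : j + 1 < i
              · exact hprior j hlt hje
              · have : j = i := by
                  rcases hev with ⟨t, ht⟩; rcases hje with ⟨u, hu⟩; omega
                subst this
                exact he)
          rw [hrec, take_two cs i h1, hd, hd2, gB]
          have : ¬(cs[i] = cs[i + 1]) := by rw [← hgi, ← hgi2]; exact he
          rw [if_neg this]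
          simp
      · rw [dif_neg hb]
        have hsm : cs.length - i ≤ 1 := by
          rcases hev with ⟨t, ht⟩
          unfold pvBoundA at hb
          rcases Nat.even_or_odd cs.length with hp | hp
          · rw [if_pos (Nat.even_iff.mp hp)] at hb; omega
          · rw [if_neg (by have := Nat.odd_iff.mp hp; omega)] at hb
            have := Nat.odd_iff.mp hp
            omega
        rw [gB_short _ (by rw [List.length_drop]; omega)]
        simp

-- ===== VERDICT (by name: the statement is the Claim_ definition above) =====
theorem FillerLetter_spec : Claim_equal_FillerLetter := by
  intro text _ hpre
  unfold Spec_FillerLetter FillerLetter FillerLetter_alt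
  obtain ⟨hlen, hxx⟩ := hpre
  have hnx : noxx text.toList := noxx_of_indexed _ hxx
  have hA := loopA_eq text.toList.length text.toList hnx (countAdj_le _)
    text.toList.length 0 (by omega) (by decide) (by omega) (by omega)
  have hB := loopB_eq text.toList.length 0 text.toList [] (by omega)
  rw [hA, hB]
  simp

@[simp] theorem FillerLetter_raises : Claim_raises_FillerLetter := by
  unfold Claim_raises_FillerLetter
  constructor
  · intro text _ hr hpre
    obtain ⟨hlen, hxx⟩ := hpre
    rcases hr with h | ⟨j, hj, hx1, hx2, _⟩
    · omega
    · exact hxx j hj ⟨hx1, hx2⟩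
  · refine ⟨by decide, by decide, ?_⟩
    show String.mk (pvLoopB "xx".toList 0 []) = "xxx"
    rw [loopB_eq 2 0 "xx".toList [] (by decide)]
    decide
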